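-- pv_equiv track=rewrite | github.com/AlexandreDubray/mining-ROI | roi_miner/miner/grid_miner/MDL_optimizer.py | generate_circles
-- ===== SOURCE A (Python) =====
-- def dense_cells_rectangle(sum_area, rectangle):
--     (min_row, min_col, max_row, max_col) = rectangle
--     return sum_area[max_row][max_col] - (sum_area[min_row - 1][max_col] if min_row > 0 else 0) - (sum_area[max_row][min_col-1] if min_col > 0 else 0) + (sum_area[min_row-1][min_col-1] if min_row > 0 and min_col > 0 else 0)
--
-- def compute_weight_circle(center, radius, sum_area):
--     dense_cells = 0
--     non_dense_cells = 0
--     (row, col) = center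
--     central_rect = (row, col - radius, row, col + radius)
--     dense = dense_cells_rectangle(sum_area, central_rect)
--     dense_cells += dense
--     non_dense_cells += radius*2 + 1 - dense
--
--     for r in range(1, radius+1):
--         upper_rect = (row + r, col - (radius - r), row + r, col + (radius - r))
--         lower_rect = (row - r, col - (radius - r), row - r, col + (radius - r))
--         nb_cell = upper_rect[3] - upper_rect[1] +1
--         upper_dense = dense_cells_rectangle(sum_area, upper_rect)
--         lower_dense = dense_cells_rectangle(sum_area, lower_rect)
--
--         dense_cells += upper_dense + lower_dense
--         non_dense_cells += 2*nb_cell - upper_dense - lower_dense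
--
--     if 3 + 2*dense_cells <= 2*non_dense_cells or dense_cells <= non_dense_cells:
--         return None
--     return (dense_cells, non_dense_cells)
--
-- def generate_circles(matrix, sum_area, map_weight):
--     nrows = len(matrix)
--     ncols = len(matrix[0])
--     candidates = list()
--
--     for row in range(nrows):
--         for col in range(ncols):
--             dist_row = min(row, nrows - 1 - row)
--             dist_col = min(col, ncols - 1 - col)
--             max_radius = min(dist_row, dist_col)
--
--             # We do not consider the circles of radius 0 since it is already handled
--             # by the rectangles
--             for radius in range(1, max_radius + 1):
--                 w = compute_weight_circle((row,col), radius, sum_area)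
--                 if w is not None:
--                     candidates.append((row, col, radius))
--                     map_weight[(row, col, radius)] = 2*(w[1]-w[0]) + 3
--     return candidates
-- ===== SOURCE B (Python) =====
-- def _cell(S, i, j):
--     # double difference of the prefix-sum array = dense count of the single cell (i, j)
--     a = S[i][j] - (S[i][j - 1] if j > 0 else 0)
--     if i == 0:
--         return a
--     return a - (S[i - 1][j] - (S[i - 1][j - 1] if j > 0 else 0))
--
-- def generate_circles(matrix, sum_area, map_weight):
--     nrows = len(matrix)
--     ncols = len(matrix[0])
--     out = []
--     for row in range(nrows):
--         for col in range(ncols):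
--             m = min(row, nrows - 1 - row, col, ncols - 1 - col)
--             if m < 1:
--                 continue
--             dense = _cell(sum_area, row, col)
--             total = 1
--             for R in range(1, m + 1):
--                 ring = (_cell(sum_area, row - R, col) + _cell(sum_area, row + R, col)
--                         + _cell(sum_area, row, col - R) + _cell(sum_area, row, col + R))
--                 for r in range(1, R):
--                     k = R - r
--                     ring += (_cell(sum_area, row - r, col - k) + _cell(sum_area, row - r, col + k)
--                              + _cell(sum_area, row + r, col - k) + _cell(sum_area, row + r, col + k))
--                 dense += ring
--                 total += 4 * R
--                 if 2 * dense > total: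
--                     out.append((row, col, R))
--                     map_weight[(row, col, R)] = 2 * (total - 2 * dense) + 3
--     return out
-- ===== Notes on version B (the rewrite author's own statement) =====
-- stated objective: alternative
-- what changed: B precomputes nothing per radius from scratch: it derives per-cell dense counts as double differences of the prefix array and maintains each center's diamond count incrementally, adding one boundary ring per radius, with the density test algebraically simplified to 2*dense > cells (A recomputes every diamond row as a 4-corner rectangle sum and tracks a separate non_dense accumulator).
import Mathlib
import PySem

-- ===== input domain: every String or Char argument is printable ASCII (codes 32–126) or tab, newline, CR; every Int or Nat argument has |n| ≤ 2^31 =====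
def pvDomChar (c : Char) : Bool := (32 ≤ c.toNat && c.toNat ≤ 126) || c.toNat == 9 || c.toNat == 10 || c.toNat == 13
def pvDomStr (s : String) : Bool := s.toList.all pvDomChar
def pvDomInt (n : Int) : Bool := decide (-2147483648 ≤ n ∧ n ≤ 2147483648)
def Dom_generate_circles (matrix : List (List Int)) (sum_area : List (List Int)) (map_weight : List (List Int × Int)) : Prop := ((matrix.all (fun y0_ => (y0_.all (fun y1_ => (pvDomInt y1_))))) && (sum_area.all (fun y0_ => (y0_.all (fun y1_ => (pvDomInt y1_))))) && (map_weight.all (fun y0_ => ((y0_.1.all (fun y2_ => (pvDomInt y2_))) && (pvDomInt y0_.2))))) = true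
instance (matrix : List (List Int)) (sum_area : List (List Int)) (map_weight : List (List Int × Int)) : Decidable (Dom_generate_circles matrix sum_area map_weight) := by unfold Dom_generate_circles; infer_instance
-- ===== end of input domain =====

-- B replaces A's per-radius recomputation of all row-rectangle sums of the diamond by an
-- incrementally maintained dense count (one boundary ring of per-cell double differences added
-- per radius) with the algebraically simplified density test 2*dense > cells; same return value,
-- and both perform the same map_weight mutation (the equivalence proved is about the return value).

-- ===== PORT A =====
-- sum_area[i][j]: Python raises IndexError out of range; every access A performs is in range
-- exactly on Pre_ (indices are provably nonnegative at each evaluated access), so the total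
-- pyGetD form is exact there.
def pvGet (S : List (List Int)) (i j : Int) : Int :=
  PySem.List.pyGetD (PySem.List.pyGetD S i []) j 0

def dense_cells_rectangle (sum_area : List (List Int)) (rect : Int × Int × Int × Int) : Int :=
  -- rect = (min_row, min_col, max_row, max_col)
  pvGet sum_area rect.2.2.1 rect.2.2.2
    - (if rect.1 > 0 then pvGet sum_area (rect.1 - 1) rect.2.2.2 else 0)
    - (if rect.2.1 > 0 then pvGet sum_area rect.2.2.1 (rect.2.1 - 1) else 0)
    + (if rect.1 > 0 ∧ rect.2.1 > 0 then pvGet sum_area (rect.1 - 1) (rect.2.1 - 1) else 0)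

def compute_weight_circle (center : Int × Int) (radius : Int) (sum_area : List (List Int)) : Option (Int × Int) :=
  let row := center.1
  let col := center.2
  let dense := dense_cells_rectangle sum_area (row, col - radius, row, col + radius)
  let st := (PySem.List.pyRange 1 (radius + 1) 1).foldl
    (fun (st : Int × Int) r =>
      let upper_rect : Int × Int × Int × Int := (row + r, col - (radius - r), row + r, col + (radius - r))
      let lower_rect : Int × Int × Int × Int := (row - r, col - (radius - r), row - r, col + (radius - r))
      let nb_cell := upper_rect.2.2.2 - upper_rect.2.1 + 1
      let upper_dense := dense_cells_rectangle sum_area upper_rect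
      let lower_dense := dense_cells_rectangle sum_area lower_rect
      (st.1 + upper_dense + lower_dense, st.2 + 2 * nb_cell - upper_dense - lower_dense))
    (0 + dense, 0 + (radius * 2 + 1 - dense))
  if 3 + 2 * st.1 ≤ 2 * st.2 ∨ st.1 ≤ st.2 then none else some st

def generate_circles (matrix : List (List Int)) (sum_area : List (List Int)) (map_weight : List (List Int × Int)) : List (Int × Int × Int) :=
  let nrows := matrix.length
  let ncols := (PySem.List.pyGetD matrix 0 ([] : List Int)).length  -- matrix[0]: IndexError on [], excluded by Pre_
  let st := (List.range nrows).foldl (fun st row =>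
    (List.range ncols).foldl (fun (st : List (Int × Int × Int) × PySem.Dict (List Int) Int) col =>
      let dist_row : Int := min (row : Int) ((nrows : Int) - 1 - (row : Int))
      let dist_col : Int := min (col : Int) ((ncols : Int) - 1 - (col : Int))
      let max_radius : Int := min dist_row dist_col
      (PySem.List.pyRange 1 (max_radius + 1) 1).foldl (fun st radius =>
        match compute_weight_circle ((row : Int), (col : Int)) radius sum_area with
        | none => st
        | some w => (st.1 ++ [((row : Int), (col : Int), radius)],
                     st.2.insert [(row : Int), (col : Int), radius] (2 * (w.2 - w.1) + 3)))
        st) st)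
    (([] : List (Int × Int × Int)), PySem.Dict.ofList map_weight)
  st.1

-- ===== PORT B =====
-- Source B _cell: the dense count of the single cell (i, j), a double difference of the prefix array
def diamond_cell (S : List (List Int)) (i j : Int) : Int :=
  let a := pvGet S i j - (if j > 0 then pvGet S i (j - 1) else 0)
  if i = 0 then a else a - (pvGet S (i - 1) j - (if j > 0 then pvGet S (i - 1) (j - 1) else 0))

def generate_circles_alt (matrix : List (List Int)) (sum_area : List (List Int)) (map_weight : List (List Int × Int)) : List (Int × Int × Int) :=
  let nrows := matrix.length
  let ncols := (PySem.List.pyGetD matrix 0 ([] : List Int)).length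
  let st := (List.range nrows).foldl (fun st row =>
    (List.range ncols).foldl (fun (st : List (Int × Int × Int) × PySem.Dict (List Int) Int) col =>
      let m : Int := min (min (min (row : Int) ((nrows : Int) - 1 - (row : Int))) (col : Int)) ((ncols : Int) - 1 - (col : Int))
      if m < 1 then st
      else
        let acc := (PySem.List.pyRange 1 (m + 1) 1).foldl
          (fun (acc : (List (Int × Int × Int) × PySem.Dict (List Int) Int) × Int × Int) R =>
            let ring0 := diamond_cell sum_area ((row : Int) - R) (col : Int)
                       + diamond_cell sum_area ((row : Int) + R) (col : Int)
                       + diamond_cell sum_area (row : Int) ((col : Int) - R)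
                       + diamond_cell sum_area (row : Int) ((col : Int) + R)
            let ring := (PySem.List.pyRange 1 R 1).foldl
              (fun rg r =>
                rg + (diamond_cell sum_area ((row : Int) - r) ((col : Int) - (R - r))
                    + diamond_cell sum_area ((row : Int) - r) ((col : Int) + (R - r))
                    + diamond_cell sum_area ((row : Int) + r) ((col : Int) - (R - r))
                    + diamond_cell sum_area ((row : Int) + r) ((col : Int) + (R - r))))
              ring0
            let dense := acc.2.1 + ring
            let total := acc.2.2 + 4 * R
            if 2 * dense > total then
              ((acc.1.1 ++ [((row : Int), (col : Int), R)],
                acc.1.2.insert [(row : Int), (col : Int), R] (2 * (total - 2 * dense) + 3)), dense, total)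
            else (acc.1, dense, total))
          (st, diamond_cell sum_area (row : Int) (col : Int), 1)
        acc.1) st)
    (([] : List (Int × Int × Int)), PySem.Dict.ofList map_weight)
  st.1

-- ===== PRECONDITION & SPEC =====
-- the maximal radius A considers at a center (row, col)
def pvM (nrows ncols row col : Nat) : Nat :=
  min (min row (nrows - 1 - row)) (min col (ncols - 1 - col))

-- all prefix-array accesses of the two symmetric diamond rows at distance r are in range
def pvRowsOk (sum_area : List (List Int)) (row col M r : Nat) : Prop :=
  ∀ i ∈ [row - r, row + r],
    i < sum_area.length ∧ col + M - r < (sum_area.getD i []).length ∧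
    (i = 0 ∨ col + M - r < (sum_area.getD (i - 1) []).length)

-- Exactly the inputs on which the Python A returns (no IndexError): matrix nonempty, and every
-- prefix-array cell the diamond scans touch is present in sum_area.
def Pre_generate_circles (matrix : List (List Int)) (sum_area : List (List Int)) (map_weight : List (List Int × Int)) : Prop :=
  matrix ≠ [] ∧
  ∀ row < matrix.length, ∀ col < (PySem.List.pyGetD matrix 0 ([] : List Int)).length,
    pvM matrix.length (PySem.List.pyGetD matrix 0 ([] : List Int)).length row col < 1 ∨
    ∀ r ≤ pvM matrix.length (PySem.List.pyGetD matrix 0 ([] : List Int)).length row col,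
      pvRowsOk sum_area row col (pvM matrix.length (PySem.List.pyGetD matrix 0 ([] : List Int)).length row col) r

instance (matrix : List (List Int)) (sum_area : List (List Int)) (map_weight : List (List Int × Int)) : Decidable (Pre_generate_circles matrix sum_area map_weight) := by
  unfold Pre_generate_circles pvRowsOk; infer_instance

def pvWitness_generate_circles : List (List Int) × List (List Int) × (List (List Int × Int)) :=
  ([[1, 0, 0], [0, 1, 0], [0, 0, 1]], [[1, 1, 1], [1, 2, 2], [1, 2, 3]], [])

def Spec_generate_circles (matrix : List (List Int)) (sum_area : List (List Int)) (map_weight : List (List Int × Int)) (out : List (Int × Int × Int)) : Prop := out = generate_circles_alt matrix sum_area map_weight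
instance (matrix : List (List Int)) (sum_area : List (List Int)) (map_weight : List (List Int × Int)) (out : List (Int × Int × Int)) : Decidable (Spec_generate_circles matrix sum_area map_weight out) := by unfold Spec_generate_circles; infer_instance

-- ===== CLAIM (what is proved, stated in full; the proofs are below) =====
def Claim_equal_generate_circles : Prop := ∀ (matrix : List (List Int)) (sum_area : List (List Int)) (map_weight : List (List Int × Int)), Dom_generate_circles matrix sum_area map_weight → Pre_generate_circles matrix sum_area map_weight → Spec_generate_circles matrix sum_area map_weight (generate_circles matrix sum_area map_weight)

-- ===== LEMMAS AND PROOFS =====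

-- row component of the inclusion–exclusion formula
def pvF (S : List (List Int)) (i j : Int) : Int :=
  pvGet S i j - (if i > 0 then pvGet S (i - 1) j else 0)

theorem rect_eq (S : List (List Int)) (i a b : Int) :
    dense_cells_rectangle S (i, a, i, b) = pvF S i b - (if a > 0 then pvF S i (a - 1) else 0) := by
  simp only [dense_cells_rectangle, pvF]
  split_ifs <;> simp_all <;> ring

theorem cell_eq (S : List (List Int)) (i j : Int) (hi : 0 ≤ i) :
    diamond_cell S i j = pvF S i j - (if j > 0 then pvF S i (j - 1) else 0) := by
  simp only [diamond_cell, pvF]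
  by_cases h0 : i = 0
  · simp [h0]
  · have h1 : (0:Int) < i := lt_of_le_of_ne hi (Ne.symm h0)
    simp only [if_neg h0, if_pos h1]
    split_ifs <;> ring

theorem rect_single (S : List (List Int)) (i c : Int) (hi : 0 ≤ i) :
    dense_cells_rectangle S (i, c, i, c) = diamond_cell S i c := by
  rw [rect_eq, cell_eq S i c hi]

theorem rect_widen (S : List (List Int)) (i a b : Int) (hi : 0 ≤ i) (ha : 1 ≤ a) (hb : a - 1 ≤ b) :
    dense_cells_rectangle S (i, a - 1, i, b + 1)
      = dense_cells_rectangle S (i, a, i, b) + diamond_cell S i (a - 1) + diamond_cell S i (b + 1) := by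
  rw [rect_eq, rect_eq, cell_eq S i (a - 1) hi, cell_eq S i (b + 1) hi]
  have e1 : b + 1 - 1 = b := by ring
  rw [e1, if_pos (show (0:Int) < a by omega), if_pos (show (0:Int) < b + 1 by omega)]
  split_ifs <;> ring

-- the diamond row rectangle of half-width k at row i, centered on column col
def pvU (S : List (List Int)) (col i k : Int) : Int :=
  dense_cells_rectangle S (i, col - k, i, col + k)

theorem pvU_zero (S : List (List Int)) (col i : Int) (hi : 0 ≤ i) :
    pvU S col i 0 = diamond_cell S i col := by
  simp only [pvU, sub_zero, add_zero]
  exact rect_single S i col hi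

theorem pvU_widen (S : List (List Int)) (col i k : Int) (hi : 0 ≤ i) (hk : 0 ≤ k) (hcol : k + 1 ≤ col) :
    pvU S col i (k + 1)
      = pvU S col i k + diamond_cell S i (col - (k + 1)) + diamond_cell S i (col + (k + 1)) := by
  simp only [pvU]
  have e1 : col - (k + 1) = (col - k) - 1 := by ring
  have e2 : col + (k + 1) = (col + k) + 1 := by ring
  rw [e1, e2, rect_widen S i (col - k) (col + k) hi (by omega) (by omega)]

-- A's dense count of the diamond of radius R (central row + the R pairs of rows)
def pvDcA (S : List (List Int)) (row col : Int) (R : Nat) : Int :=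
  pvU S col row (R : Int) +
  ((List.range R).map (fun (s : Nat) =>
      pvU S col (row + (1 + (s : Int))) ((R : Int) - (1 + (s : Int)))
    + pvU S col (row - (1 + (s : Int))) ((R : Int) - (1 + (s : Int))))).sum

-- B's boundary ring of radius R, in normalized (R+1)-free form
def pvRingN (S : List (List Int)) (row col : Int) (R : Nat) : Int :=
  (diamond_cell S (row - (R : Int)) col + diamond_cell S (row + (R : Int)) col
   + diamond_cell S row (col - (R : Int)) + diamond_cell S row (col + (R : Int))) +
  ((List.range (R - 1)).map (fun (s : Nat) =>
      diamond_cell S (row - (1 + (s : Int))) (col - ((R : Int) - (1 + (s : Int))))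
    + diamond_cell S (row - (1 + (s : Int))) (col + ((R : Int) - (1 + (s : Int))))
    + diamond_cell S (row + (1 + (s : Int))) (col - ((R : Int) - (1 + (s : Int))))
    + diamond_cell S (row + (1 + (s : Int))) (col + ((R : Int) - (1 + (s : Int)))))).sum

-- B's incrementally maintained dense count
def pvDm (S : List (List Int)) (row col : Int) : Nat → Int
  | 0 => diamond_cell S row col
  | R + 1 => pvDm S row col R + pvRingN S row col (R + 1)

-- the number of cells of the diamond of radius R
def pvCnt (R : Nat) : Int := 2 * (R : Int) * (R : Int) + 2 * (R : Int) + 1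

theorem sum_map_add_pair (f g : Nat → Int) (l : List Nat) :
    (l.map (fun s => f s + g s)).sum = (l.map f).sum + (l.map g).sum := by
  induction l with
  | nil => simp
  | cons x xs ih => simp only [List.map_cons, List.sum_cons, ih]; ring

theorem pair_widen (S : List (List Int)) (row col : Int) (R s : Nat) (hs : s < R)
    (hrow : (R : Int) + 1 ≤ row) (hcol : (R : Int) + 1 ≤ col) :
    pvU S col (row + (1 + (s : Int))) ((R : Int) + 1 - (1 + (s : Int)))
      + pvU S col (row - (1 + (s : Int))) ((R : Int) + 1 - (1 + (s : Int)))
    = (pvU S col (row + (1 + (s : Int))) ((R : Int) - (1 + (s : Int)))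
      + pvU S col (row - (1 + (s : Int))) ((R : Int) - (1 + (s : Int))))
      + (diamond_cell S (row - (1 + (s : Int))) (col - ((R : Int) + 1 - (1 + (s : Int))))
        + diamond_cell S (row - (1 + (s : Int))) (col + ((R : Int) + 1 - (1 + (s : Int))))
        + diamond_cell S (row + (1 + (s : Int))) (col - ((R : Int) + 1 - (1 + (s : Int))))
        + diamond_cell S (row + (1 + (s : Int))) (col + ((R : Int) + 1 - (1 + (s : Int))))) := by
  have hsR : (s : Int) + 1 ≤ (R : Int) := by exact_mod_cast hs
  have e : (R : Int) + 1 - (1 + (s : Int)) = ((R : Int) - (1 + (s : Int))) + 1 := by ring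
  rw [e, pvU_widen S col (row + (1 + (s : Int))) _ (by omega) (by omega) (by omega),
      pvU_widen S col (row - (1 + (s : Int))) _ (by omega) (by omega) (by omega)]
  ring

-- A's from-scratch diamond count equals B's ring-incremental one
theorem pvDcA_eq_pvDm (S : List (List Int)) (row col : Int) (h0 : 0 ≤ row) :
    ∀ R : Nat, (R : Int) ≤ row → (R : Int) ≤ col → pvDcA S row col R = pvDm S row col R := by
  intro R
  induction R with
  | zero =>
    intro _ _
    simp [pvDcA, pvDm, pvU_zero S col row h0]
  | succ R ih =>
    intro hrow hcol
    have hc : ((R + 1 : Nat) : Int) = (R : Int) + 1 := by push_cast; ring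
    rw [hc] at hrow hcol
    have hrow' : (R : Int) ≤ row := by omega
    have hcol' : (R : Int) ≤ col := by omega
    rw [pvDm, ← ih hrow' hcol']
    -- normalize the (R+1)-indexed objects
    rw [pvDcA, pvDcA]
    rw [show (List.range (R + 1)) = List.range R ++ [R] from List.range_succ]
    rw [List.map_append, List.sum_append]
    have hring : pvRingN S row col (R + 1)
        = (diamond_cell S (row - ((R : Int) + 1)) col + diamond_cell S (row + ((R : Int) + 1)) col
           + diamond_cell S row (col - ((R : Int) + 1)) + diamond_cell S row (col + ((R : Int) + 1))) +
          ((List.range R).map (fun (s : Nat) =>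
              diamond_cell S (row - (1 + (s : Int))) (col - ((R : Int) + 1 - (1 + (s : Int))))
            + diamond_cell S (row - (1 + (s : Int))) (col + ((R : Int) + 1 - (1 + (s : Int))))
            + diamond_cell S (row + (1 + (s : Int))) (col - ((R : Int) + 1 - (1 + (s : Int))))
            + diamond_cell S (row + (1 + (s : Int))) (col + ((R : Int) + 1 - (1 + (s : Int)))))).sum := by
      rw [pvRingN]
      push_cast
      rfl
    rw [hring]
    -- the surviving sum, row pair by row pair
    have hmap : ((List.range R).map (fun (s : Nat) =>
          pvU S col (row + (1 + (s : Int))) (((R + 1 : Nat) : Int) - (1 + (s : Int)))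
        + pvU S col (row - (1 + (s : Int))) (((R + 1 : Nat) : Int) - (1 + (s : Int))))).sum
        = ((List.range R).map (fun (s : Nat) =>
            (pvU S col (row + (1 + (s : Int))) ((R : Int) - (1 + (s : Int)))
            + pvU S col (row - (1 + (s : Int))) ((R : Int) - (1 + (s : Int))))
            + (diamond_cell S (row - (1 + (s : Int))) (col - ((R : Int) + 1 - (1 + (s : Int))))
              + diamond_cell S (row - (1 + (s : Int))) (col + ((R : Int) + 1 - (1 + (s : Int))))
              + diamond_cell S (row + (1 + (s : Int))) (col - ((R : Int) + 1 - (1 + (s : Int))))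
              + diamond_cell S (row + (1 + (s : Int))) (col + ((R : Int) + 1 - (1 + (s : Int))))))).sum := by
      apply congrArg
      apply List.map_congr_left
      intro s hsmem
      have hs : s < R := List.mem_range.mp hsmem
      rw [hc]
      exact pair_widen S row col R s hs hrow hcol
    rw [hmap, sum_map_add_pair]
    simp only [List.map_cons, List.map_nil, List.sum_cons, List.sum_nil, add_zero]
    rw [hc]
    -- the new outermost row pair (s = R) degenerates to the two vertical vertices
    have hlast : pvU S col (row + (1 + (R : Int))) ((R : Int) + 1 - (1 + (R : Int)))
        + pvU S col (row - (1 + (R : Int))) ((R : Int) + 1 - (1 + (R : Int)))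
        = diamond_cell S (row + (1 + (R : Int))) col + diamond_cell S (row - (1 + (R : Int))) col := by
      rw [show (R : Int) + 1 - (1 + (R : Int)) = 0 from by ring,
          pvU_zero S col _ (by omega), pvU_zero S col _ (by omega)]
    rw [hlast]
    -- the central row widens into the two horizontal vertices
    rw [pvU_widen S col row (R : Int) h0 (by positivity) (by omega)]
    ring_nf

-- ---- characterizing A's compute_weight_circle ----

-- the exact fold A's compute_weight_circle runs, as initial state plus sums
theorem cwc_fold_char (S : List (List Int)) (row col radius : Int) :
    ∀ (xs : List Int) (a b : Int),
    xs.foldl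
      (fun (st : Int × Int) r =>
        let upper_rect : Int × Int × Int × Int := (row + r, col - (radius - r), row + r, col + (radius - r))
        let lower_rect : Int × Int × Int × Int := (row - r, col - (radius - r), row - r, col + (radius - r))
        let nb_cell := upper_rect.2.2.2 - upper_rect.2.1 + 1
        let upper_dense := dense_cells_rectangle S upper_rect
        let lower_dense := dense_cells_rectangle S lower_rect
        (st.1 + upper_dense + lower_dense, st.2 + 2 * nb_cell - upper_dense - lower_dense))
      (a, b)
    = (a + (xs.map (fun r => pvU S col (row + r) (radius - r) + pvU S col (row - r) (radius - r))).sum,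
       b + (xs.map (fun r => 2 * ((col + (radius - r)) - (col - (radius - r)) + 1))).sum
         - (xs.map (fun r => pvU S col (row + r) (radius - r) + pvU S col (row - r) (radius - r))).sum) := by
  intro xs
  induction xs with
  | nil => intro a b; simp
  | cons x t ih =>
    intro a b
    simp only [List.foldl_cons, List.map_cons, List.sum_cons]
    rw [ih]
    simp only [Prod.mk.injEq, pvU]
    constructor <;> ring

theorem sum_nb (col : Int) (R : Nat) :
    ((List.range R).map (fun (s : Nat) =>
        2 * ((col + ((R : Int) - (1 + (s : Int)))) - (col - ((R : Int) - (1 + (s : Int)))) + 1))).sum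
      = 2 * (R : Int) * (R : Int) := by
  have key : ∀ (n : Nat), ((List.range n).map (fun (s : Nat) => 4 * ((n : Int) - (1 + (s : Int))) + 2)).sum
      = 2 * (n : Int) * (n : Int) := by
    intro n
    induction n with
    | zero => simp
    | succ n ih =>
      rw [List.range_succ_eq_map, List.map_cons, List.sum_cons, List.map_map]
      have hcomp : ((fun (s : Nat) => 4 * (((n+1 : Nat) : Int) - (1 + (s : Int))) + 2) ∘ Nat.succ)
          = (fun (s : Nat) => (4 * ((n : Int) - (1 + (s : Int))) + 2)) := by
        funext s
        simp only [Function.comp]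
        push_cast
        ring
      rw [hcomp, ih]
      push_cast
      ring
  calc ((List.range R).map (fun (s : Nat) =>
        2 * ((col + ((R : Int) - (1 + (s : Int)))) - (col - ((R : Int) - (1 + (s : Int)))) + 1))).sum
      = ((List.range R).map (fun (s : Nat) => 4 * ((R : Int) - (1 + (s : Int))) + 2)).sum := by
        apply congrArg; apply List.map_congr_left; intro s _; ring
    _ = 2 * (R : Int) * (R : Int) := key R

theorem cwc_eq (S : List (List Int)) (row col : Int) (h0 : 0 ≤ row) (R : Nat)
    (hrow : (R : Int) ≤ row) (hcol : (R : Int) ≤ col) :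
    compute_weight_circle (row, col) (R : Int) S
      = if 3 + 2 * pvDm S row col R ≤ 2 * (pvCnt R - pvDm S row col R)
          ∨ pvDm S row col R ≤ pvCnt R - pvDm S row col R
        then none else some (pvDm S row col R, pvCnt R - pvDm S row col R) := by
  have hlist : PySem.List.pyRange 1 ((R : Int) + 1) 1 = (List.range R).map (fun (k : Nat) => 1 + (k : Int)) := by
    rw [PySem.List.pyRange_one]
    norm_num
  simp only [compute_weight_circle]
  rw [hlist, cwc_fold_char]
  have hf : ((List.range R).map (fun (k : Nat) => 1 + (k : Int))).map
        (fun r => pvU S col (row + r) ((R : Int) - r) + pvU S col (row - r) ((R : Int) - r))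
      = (List.range R).map (fun (s : Nat) =>
          pvU S col (row + (1 + (s : Int))) ((R : Int) - (1 + (s : Int)))
        + pvU S col (row - (1 + (s : Int))) ((R : Int) - (1 + (s : Int)))) := by
    rw [List.map_map]; rfl
  have hnb : ((List.range R).map (fun (k : Nat) => 1 + (k : Int))).map
        (fun r => 2 * ((col + ((R : Int) - r)) - (col - ((R : Int) - r)) + 1))
      = (List.range R).map (fun (s : Nat) =>
          2 * ((col + ((R : Int) - (1 + (s : Int)))) - (col - ((R : Int) - (1 + (s : Int)))) + 1)) := by
    rw [List.map_map]; rfl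
  rw [hf, hnb, sum_nb]
  have hdc : 0 + dense_cells_rectangle S (row, col - (R : Int), row, col + (R : Int))
      + ((List.range R).map (fun (s : Nat) =>
          pvU S col (row + (1 + (s : Int))) ((R : Int) - (1 + (s : Int)))
        + pvU S col (row - (1 + (s : Int))) ((R : Int) - (1 + (s : Int))))).sum
      = pvDm S row col R := by
    rw [← pvDcA_eq_pvDm S row col h0 R hrow hcol, pvDcA, pvU]
    ring
  rw [hdc]
  have hnd : 0 + ((R : Int) * 2 + 1 - dense_cells_rectangle S (row, col - (R : Int), row, col + (R : Int)))
      + 2 * (R : Int) * (R : Int)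
      - ((List.range R).map (fun (s : Nat) =>
          pvU S col (row + (1 + (s : Int))) ((R : Int) - (1 + (s : Int)))
        + pvU S col (row - (1 + (s : Int))) ((R : Int) - (1 + (s : Int))))).sum
      = pvCnt R - pvDm S row col R := by
    rw [← pvDcA_eq_pvDm S row col h0 R hrow hcol, pvDcA, pvU, pvCnt]
    ring
  rw [hnd]

theorem foldl_add_char (f : Int → Int) : ∀ (xs : List Int) (a : Int),
    xs.foldl (fun rg r => rg + f r) a = a + (xs.map f).sum := by
  intro xs
  induction xs with
  | nil => intro a; simp
  | cons x t ih => intro a; simp only [List.foldl_cons, List.map_cons, List.sum_cons, ih]; ring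

theorem ring_fold (S : List (List Int)) (row col : Int) (R : Nat) :
    (PySem.List.pyRange 1 ((R : Nat) : Int) 1).foldl
      (fun rg r => rg + (diamond_cell S (row - r) (col - ((R : Int) - r))
                    + diamond_cell S (row - r) (col + ((R : Int) - r))
                    + diamond_cell S (row + r) (col - ((R : Int) - r))
                    + diamond_cell S (row + r) (col + ((R : Int) - r))))
      (diamond_cell S (row - (R : Int)) col + diamond_cell S (row + (R : Int)) col
       + diamond_cell S row (col - (R : Int)) + diamond_cell S row (col + (R : Int)))
    = pvRingN S row col R := by
  rw [foldl_add_char, PySem.List.pyRange_one]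
  have ht : (((R : Nat) : Int) - 1).toNat = R - 1 := by omega
  rw [ht, List.map_map, pvRingN]
  rfl

-- the per-center loop over radii: B's fold carries A's fold state plus (dense, total)
theorem radii_fold (S : List (List Int)) (row col : Int) (h0r : 0 ≤ row) :
    ∀ (M : Nat), (M : Int) ≤ row → (M : Int) ≤ col →
    ∀ st : List (Int × Int × Int) × PySem.Dict (List Int) Int,
    (PySem.List.pyRange 1 ((M : Int) + 1) 1).foldl
      (fun (acc : (List (Int × Int × Int) × PySem.Dict (List Int) Int) × Int × Int) R =>
        let ring0 := diamond_cell S (row - R) col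
                   + diamond_cell S (row + R) col
                   + diamond_cell S row (col - R)
                   + diamond_cell S row (col + R)
        let ring := (PySem.List.pyRange 1 R 1).foldl
          (fun rg r =>
            rg + (diamond_cell S (row - r) (col - (R - r))
                + diamond_cell S (row - r) (col + (R - r))
                + diamond_cell S (row + r) (col - (R - r))
                + diamond_cell S (row + r) (col + (R - r))))
          ring0
        let dense := acc.2.1 + ring
        let total := acc.2.2 + 4 * R
        if 2 * dense > total then
          ((acc.1.1 ++ [(row, col, R)],
            acc.1.2.insert [row, col, R] (2 * (total - 2 * dense) + 3)), dense, total)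
        else (acc.1, dense, total))
      (st, diamond_cell S row col, 1)
    = ((PySem.List.pyRange 1 ((M : Int) + 1) 1).foldl
        (fun st radius =>
          match compute_weight_circle (row, col) radius S with
          | none => st
          | some w => (st.1 ++ [(row, col, radius)],
                       st.2.insert [row, col, radius] (2 * (w.2 - w.1) + 3)))
        st,
       pvDm S row col M, pvCnt M) := by
  intro M
  induction M with
  | zero =>
    intro _ _ st
    rw [PySem.List.pyRange_one_eq_nil (by norm_num)]
    simp [pvDm, pvCnt]
  | succ M ih =>
    intro hrow hcol st
    have hc : ((M + 1 : Nat) : Int) = (M : Int) + 1 := by push_cast; ring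
    rw [hc] at hrow hcol
    have hrow' : (M : Int) ≤ row := by omega
    have hcol' : (M : Int) ≤ col := by omega
    rw [hc, PySem.List.pyRange_one_succ_right (by omega), List.foldl_append, List.foldl_append,
        ih hrow' hcol' st]
    simp only [List.foldl_cons, List.foldl_nil]
    -- the single new step, at radius ↑M + 1
    have hring := ring_fold S row col (M + 1)
    rw [hc] at hring
    rw [hring]
    have hdense : pvDm S row col M + pvRingN S row col (M + 1) = pvDm S row col (M + 1) := rfl
    have htotal : pvCnt M + 4 * ((M : Int) + 1) = pvCnt (M + 1) := by
      simp only [pvCnt]; push_cast; ring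
    rw [hdense, htotal]
    have hcwc := cwc_eq S row col h0r (M + 1) (by rw [hc]; omega) (by rw [hc]; omega)
    rw [hc] at hcwc
    rw [hcwc]
    set d := pvDm S row col (M + 1) with hd
    set c := pvCnt (M + 1) with hcnt
    by_cases hgt : 2 * d > c
    · rw [if_pos hgt, if_neg (by omega)]
      have hv : c - d - d = c - 2 * d := by ring
      simp only [hv]
    · rw [if_neg hgt, if_pos (by omega)]

-- A's and B's per-center computations agree, for every incoming state
theorem center_eq (S : List (List Int)) (nrows ncols : Nat) (row col : Int)
    (h0r : 0 ≤ row)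
    (st : List (Int × Int × Int) × PySem.Dict (List Int) Int) :
    (PySem.List.pyRange 1 (min (min row ((nrows : Int) - 1 - row))
                               (min col ((ncols : Int) - 1 - col)) + 1) 1).foldl
      (fun st radius =>
        match compute_weight_circle (row, col) radius S with
        | none => st
        | some w => (st.1 ++ [(row, col, radius)],
                     st.2.insert [row, col, radius] (2 * (w.2 - w.1) + 3)))
      st
    = (if min (min (min row ((nrows : Int) - 1 - row)) col)
            ((ncols : Int) - 1 - col) < 1 then st
       else
        ((PySem.List.pyRange 1 (min (min (min row ((nrows : Int) - 1 - row)) col)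
            ((ncols : Int) - 1 - col) + 1) 1).foldl
          (fun (acc : (List (Int × Int × Int) × PySem.Dict (List Int) Int) × Int × Int) R =>
            let ring0 := diamond_cell S (row - R) col
                       + diamond_cell S (row + R) col
                       + diamond_cell S row (col - R)
                       + diamond_cell S row (col + R)
            let ring := (PySem.List.pyRange 1 R 1).foldl
              (fun rg r =>
                rg + (diamond_cell S (row - r) (col - (R - r))
                    + diamond_cell S (row - r) (col + (R - r))
                    + diamond_cell S (row + r) (col - (R - r))
                    + diamond_cell S (row + r) (col + (R - r))))
              ring0
            let dense := acc.2.1 + ring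
            let total := acc.2.2 + 4 * R
            if 2 * dense > total then
              ((acc.1.1 ++ [(row, col, R)],
                acc.1.2.insert [row, col, R] (2 * (total - 2 * dense) + 3)), dense, total)
            else (acc.1, dense, total))
          (st, diamond_cell S row col, 1)).1) := by
  have hm : min (min (min row ((nrows : Int) - 1 - row)) col)
      ((ncols : Int) - 1 - col)
      = min (min row ((nrows : Int) - 1 - row))
            (min col ((ncols : Int) - 1 - col)) := min_assoc _ _ _
  rw [hm]
  set mr := min (min row ((nrows : Int) - 1 - row))
            (min col ((ncols : Int) - 1 - col)) with hmr
  by_cases hlt : mr < 1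
  · rw [if_pos hlt, PySem.List.pyRange_one_eq_nil (by omega), List.foldl_nil]
  · rw [if_neg hlt]
    have h0 : 0 ≤ mr := by omega
    have hM : ((mr.toNat : Nat) : Int) = mr := Int.toNat_of_nonneg h0
    have hrowb : (mr.toNat : Int) ≤ row := by
      rw [hM, hmr]
      exact le_trans (min_le_left _ _) (min_le_left _ _)
    have hcolb : (mr.toNat : Int) ≤ col := by
      rw [hM, hmr]
      exact le_trans (min_le_right _ _) (min_le_left _ _)
    have := radii_fold S row col h0r
      mr.toNat hrowb hcolb st
    rw [hM] at this
    rw [this]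

theorem ports_agree (matrix sum_area : List (List Int)) (map_weight : List (List Int × Int)) :
    generate_circles matrix sum_area map_weight = generate_circles_alt matrix sum_area map_weight := by
  simp only [generate_circles, generate_circles_alt]
  apply congrArg Prod.fst
  apply List.foldl_ext
  intro st row hrowmem
  apply List.foldl_ext
  intro st' col _
  have h0r : 0 ≤ row := by
    simp only [List.bind_eq_flatMap, List.mem_flatMap, List.mem_range, List.mem_pure] at hrowmem
    obtain ⟨a, _, rfl⟩ := hrowmem
    positivity
  exact center_eq sum_area matrix.length (PySem.List.pyGetD matrix 0 ([] : List Int)).length row col h0r st'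

-- ===== VERDICT (by name: the statement is the Claim_ definition above) =====
theorem generate_circles_spec : Claim_equal_generate_circles := by
  intro matrix sum_area map_weight _ _
  unfold Spec_generate_circles
  exact ports_agree matrix sum_area map_weight
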